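-- pv_equiv track=rewrite | github.com/ShaileshSridhar2403/Human-Activity-Extractor | extract-human-segments.py | process_frame_list
-- ===== SOURCE A (Python) =====
-- def process_frame_list(frame_list,frame_range,frame_count,fps,time_padding=10):
--     processed_frame_list = []
--     start_frame_ind = 0
--     end_frame_ind = 0
--     ind = 0
--     frame_padding = fps*time_padding
--     while end_frame_ind+1 < len(frame_list):
--         if frame_list[end_frame_ind+1] - frame_list[end_frame_ind] == frame_range:
--             end_frame_ind += 1
--         else:
--             start_frame= max(frame_list[start_frame_ind]-frame_padding,0)
--             end_frame = min(frame_list[end_frame_ind]+frame_padding,frame_count)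
--
--             if len(processed_frame_list) > 0 and processed_frame_list[-1][1] >= start_frame - frame_padding:
--                 processed_frame_list[-1] = (processed_frame_list[-1][0],end_frame)
--             else:
--                 processed_frame_list.append((start_frame,end_frame))
--             start_frame_ind = end_frame_ind + 1
--             end_frame_ind += 1
--
--     return processed_frame_list
-- ===== SOURCE B (Python) =====
-- def process_frame_list(frame_list, frame_range, frame_count, fps, time_padding=10):
--     frame_padding = fps * time_padding
--     # First pass: split frame_list into maximal runs of consecutive frames
--     # (difference == frame_range between neighbours).
--     runs = []
--     prev = None
--     for v in frame_list:
--         if runs and v - prev == frame_range: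
--             runs[-1].append(v)
--         else:
--             runs.append([v])
--         prev = v
--     # Second pass: emit a padded segment for every run except the still-open
--     # last one, merging segments whose padded spans come close enough.
--     out = []
--     for run in runs[:-1]:
--         start = max(run[0] - frame_padding, 0)
--         end = min(run[-1] + frame_padding, frame_count)
--         if out and out[-1][1] >= start - frame_padding:
--             out[-1] = (out[-1][0], end)
--         else:
--             out.append((start, end))
--     return out
-- ===== Notes on version B (the rewrite author's own statement) =====
-- stated objective: alternative
-- what changed: Replaces A's single index-juggling while loop over three mutable indices with a two-pass decomposition: first split the frame list into maximal consecutive runs, then fold over all runs but the last emitting/merging padded segments.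
import Mathlib
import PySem

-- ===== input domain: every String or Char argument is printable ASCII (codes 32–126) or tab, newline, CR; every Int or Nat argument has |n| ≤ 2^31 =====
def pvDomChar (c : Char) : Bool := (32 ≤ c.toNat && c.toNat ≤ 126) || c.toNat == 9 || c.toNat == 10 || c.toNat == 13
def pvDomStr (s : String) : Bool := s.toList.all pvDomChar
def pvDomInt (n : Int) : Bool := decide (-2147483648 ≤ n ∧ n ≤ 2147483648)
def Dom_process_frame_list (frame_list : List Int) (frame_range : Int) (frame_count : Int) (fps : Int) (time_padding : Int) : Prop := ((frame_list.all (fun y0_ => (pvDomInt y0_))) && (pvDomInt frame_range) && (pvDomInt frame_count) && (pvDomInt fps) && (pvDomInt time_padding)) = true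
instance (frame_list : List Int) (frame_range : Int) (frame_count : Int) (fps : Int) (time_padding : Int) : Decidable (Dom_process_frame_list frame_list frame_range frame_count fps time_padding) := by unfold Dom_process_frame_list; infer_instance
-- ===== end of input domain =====

-- B replaces A's index-juggling while loop with a two-pass decomposition (split into
-- maximal runs, then fold emitting/merging padded segments over all runs but the last);
-- same cost, alternative structure.

-- ===== PORT A =====
-- A: while loop over indices (start_frame_ind, end_frame_ind), emitting a padded
-- segment at each break; the final run is never emitted (loop exits before it).
def pflLoopA (fl : List Int) (fr fc fp : Int) (acc : List (Int × Int))
    (startI endI : Nat) : List (Int × Int) :=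
  if _h : endI + 1 < fl.length then
    if fl.getD (endI + 1) 0 - fl.getD endI 0 = fr then
      pflLoopA fl fr fc fp acc startI (endI + 1)
    else
      let s := max (fl.getD startI 0 - fp) 0
      let e := min (fl.getD endI 0 + fp) fc
      let acc' :=
        if acc ≠ [] ∧ (acc.getLastD (0, 0)).2 ≥ s - fp then
          acc.dropLast ++ [((acc.getLastD (0, 0)).1, e)]
        else
          acc ++ [(s, e)]
      pflLoopA fl fr fc fp acc' (endI + 1) (endI + 1)
  else acc
termination_by fl.length - endI

def process_frame_list (frame_list : List Int) (frame_range : Int) (frame_count : Int) (fps : Int) (time_padding : Int) : List (Int × Int) :=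
  pflLoopA frame_list frame_range frame_count (fps * time_padding) [] 0 0

-- ===== PORT B =====
-- B pass 1: fold splitting the list into maximal runs, tracking the previous value.
def pflBStep (fr : Int) (st : List (List Int) × Option Int) (v : Int) : List (List Int) × Option Int :=
  if st.1 ≠ [] ∧ v - st.2.getD 0 = fr then
    (st.1.dropLast ++ [st.1.getLastD [] ++ [v]], some v)
  else
    (st.1 ++ [[v]], some v)

-- B pass 2 body: emit the padded segment of one run, merging with the previous one.
def pflEmit (fc fp : Int) (out : List (Int × Int)) (run : List Int) : List (Int × Int) :=
  let s := max (run.headD 0 - fp) 0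
  let e := min (run.getLastD 0 + fp) fc
  if out ≠ [] ∧ (out.getLastD (0, 0)).2 ≥ s - fp then
    out.dropLast ++ [((out.getLastD (0, 0)).1, e)]
  else
    out ++ [(s, e)]

def process_frame_list_alt (frame_list : List Int) (frame_range : Int) (frame_count : Int) (fps : Int) (time_padding : Int) : List (Int × Int) :=
  let fp := fps * time_padding
  let runs := (frame_list.foldl (pflBStep frame_range) ([], none)).1
  runs.dropLast.foldl (pflEmit frame_count fp) []

-- ===== PRECONDITION & SPEC =====
def Spec_process_frame_list (frame_list : List Int) (frame_range : Int) (frame_count : Int) (fps : Int) (time_padding : Int) (out : List (Int × Int)) : Prop := out = process_frame_list_alt frame_list frame_range frame_count fps time_padding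
instance (frame_list : List Int) (frame_range : Int) (frame_count : Int) (fps : Int) (time_padding : Int) (out : List (Int × Int)) : Decidable (Spec_process_frame_list frame_list frame_range frame_count fps time_padding out) := by unfold Spec_process_frame_list; infer_instance

-- ===== CLAIM (what is proved, stated in full; the proofs are below) =====
def Claim_equal_process_frame_list : Prop := ∀ (frame_list : List Int) (frame_range : Int) (frame_count : Int) (fps : Int) (time_padding : Int), Dom_process_frame_list frame_list frame_range frame_count fps time_padding → Spec_process_frame_list frame_list frame_range frame_count fps time_padding (process_frame_list frame_list frame_range frame_count fps time_padding)

-- ===== LEMMAS AND PROOFS =====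
-- Reference: runs of `rest` with `cur` the currently open run.
def pflRunsAux (fr : Int) (cur rest : List Int) : List (List Int) :=
  match rest with
  | [] => [cur]
  | v :: rest =>
    if v - cur.getLastD 0 = fr then pflRunsAux fr (cur ++ [v]) rest
    else cur :: pflRunsAux fr [v] rest

theorem pflRunsAux_ne_nil (fr : Int) (cur rest : List Int) : pflRunsAux fr cur rest ≠ [] := by
  induction rest generalizing cur with
  | nil => simp [pflRunsAux]
  | cons v rest ih =>
    simp only [pflRunsAux]
    by_cases h : v - cur.getLastD 0 = fr
    · rw [if_pos h]; exact ih _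
    · rw [if_neg h]; simp

-- B's first pass computes pflRunsAux.
theorem pflB_fold (fr : Int) (rest : List Int) :
    ∀ (rs : List (List Int)) (cur : List Int), cur ≠ [] →
    (rest.foldl (pflBStep fr) (rs ++ [cur], some (cur.getLastD 0))).1
      = rs ++ pflRunsAux fr cur rest := by
  induction rest with
  | nil => intro rs cur _; simp [pflRunsAux]
  | cons v rest ih =>
    intro rs cur hc
    simp only [List.foldl_cons, pflBStep, pflRunsAux]
    by_cases h : v - cur.getLastD 0 = fr
    · have h1 : (rs ++ [cur] ≠ [] ∧ v - (some (cur.getLastD 0)).getD 0 = fr) := by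
        refine ⟨by simp, ?_⟩; simpa using h
      rw [if_pos h1, if_pos h]
      have e1 : (rs ++ [cur]).dropLast ++ [(rs ++ [cur]).getLastD [] ++ [v]]
          = rs ++ [cur ++ [v]] := by
        simp
      rw [e1]
      have := ih rs (cur ++ [v]) (by simp)
      simpa [List.getLastD_concat] using this
    · have h1 : ¬ (rs ++ [cur] ≠ [] ∧ v - (some (cur.getLastD 0)).getD 0 = fr) := by
        simp only [Option.getD_some]; tauto
      rw [if_neg h1, if_neg h]
      have := ih (rs ++ [cur]) [v] (by simp)
      simpa [List.getLastD] using this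

theorem pflB_runs (fr : Int) (x : Int) (xs : List Int) :
    ((x :: xs).foldl (pflBStep fr) ([], none)).1 = pflRunsAux fr [x] xs := by
  have step1 : pflBStep fr ([], none) x = ([] ++ [[x]], some (([x] : List Int).getLastD 0)) := by
    simp [pflBStep]
  simp only [List.foldl_cons, step1]
  simpa using pflB_fold fr xs [] [x] (by simp)

theorem pfl_take_getLastD (l : List Int) (n : Nat) (h : n < l.length) :
    (l.take (n + 1)).getLastD 0 = l[n] := by
  rw [List.take_add_one, List.getElem?_eq_getElem h]
  rw [Option.toList_some, List.getLastD_concat]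

-- index facts about the slice (fl.drop s).take (e+1-s)
theorem pfl_slice_headD (fl : List Int) (s k : Nat) (hs : s < fl.length) :
    ((fl.drop s).take (k + 1)).headD 0 = fl.getD s 0 := by
  have hd : fl.drop s = fl[s] :: fl.drop (s + 1) := List.drop_eq_getElem_cons hs
  rw [hd, List.take_succ_cons, List.getD_eq_getElem fl 0 hs]
  simp

theorem pfl_slice_getLastD (fl : List Int) (s e : Nat) (hse : s ≤ e) (he : e < fl.length) :
    ((fl.drop s).take (e + 1 - s)).getLastD 0 = fl.getD e 0 := by
  have h1 : e + 1 - s = (e - s) + 1 := by omega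
  have h2 : e - s < (fl.drop s).length := by simp [List.length_drop]; omega
  rw [h1, pfl_take_getLastD _ _ h2]
  have h3 : (fl.drop s)[e - s] = fl[s + (e - s)]'(by omega) := List.getElem_drop ..
  rw [h3, List.getD_eq_getElem fl 0 he]
  congr 1
  omega

theorem pfl_slice_snoc (fl : List Int) (s e : Nat) (hse : s ≤ e + 1) (he : e + 1 < fl.length) :
    (fl.drop s).take (e + 2 - s) = (fl.drop s).take (e + 1 - s) ++ [fl.getD (e + 1) 0] := by
  have h1 : e + 2 - s = (e + 1 - s) + 1 := by omega
  rw [h1, List.take_add_one]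
  congr 1
  have hidx : e + 1 - s < (fl.drop s).length := by simp [List.length_drop]; omega
  rw [List.getElem?_eq_getElem hidx]
  have h3 : (fl.drop s)[e + 1 - s] = fl[s + (e + 1 - s)]'(by omega) := List.getElem_drop ..
  rw [h3, List.getD_eq_getElem fl 0 he]
  have h4 : s + (e + 1 - s) = e + 1 := by omega
  simp [h4]

-- A's loop, in terms of the runs of the remaining suffix.
theorem pflLoopA_eq (fl : List Int) (fr fc fp : Int) :
    ∀ (n startI endI : Nat) (acc : List (Int × Int)),
    n = fl.length - (endI + 1) → startI ≤ endI → endI < fl.length →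
    pflLoopA fl fr fc fp acc startI endI
      = ((pflRunsAux fr ((fl.drop startI).take (endI + 1 - startI)) (fl.drop (endI + 1))).dropLast).foldl (pflEmit fc fp) acc := by
  intro n
  induction n with
  | zero =>
    intro startI endI acc hn hse he
    have hstop : ¬ (endI + 1 < fl.length) := by omega
    rw [pflLoopA, dif_neg hstop]
    have : fl.drop (endI + 1) = [] := List.drop_eq_nil_of_le (by omega)
    rw [this]
    simp [pflRunsAux]
  | succ n ih =>
    intro startI endI acc hn hse he
    have hlt : endI + 1 < fl.length := by omega
    have hdrop : fl.drop (endI + 1) = fl[endI + 1] :: fl.drop (endI + 2) := List.drop_eq_getElem_cons hlt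
    have hget : fl[endI + 1] = fl.getD (endI + 1) 0 := (List.getD_eq_getElem fl 0 hlt).symm
    rw [pflLoopA, dif_pos hlt, hdrop, hget]
    have hlast : ((fl.drop startI).take (endI + 1 - startI)).getLastD 0 = fl.getD endI 0 :=
      pfl_slice_getLastD fl startI endI hse he
    by_cases hcond : fl.getD (endI + 1) 0 - fl.getD endI 0 = fr
    · rw [if_pos hcond]
      rw [ih startI (endI + 1) acc (by omega) (by omega) hlt]
      simp only [pflRunsAux, hlast]
      rw [if_pos hcond]
      rw [pfl_slice_snoc fl startI endI (by omega) hlt]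
    · rw [if_neg hcond]
      rw [ih (endI + 1) (endI + 1) _ (by omega) le_rfl hlt]
      simp only [pflRunsAux, hlast]
      rw [if_neg hcond]
      have hslice1 : (fl.drop (endI + 1)).take (endI + 1 + 1 - (endI + 1)) = [fl.getD (endI + 1) 0] := by
        rw [show endI + 1 + 1 - (endI + 1) = 1 by omega]
        rw [hdrop, hget]; simp
      rw [hslice1]
      set L := pflRunsAux fr [fl.getD (endI + 1) 0] (fl.drop (endI + 2)) with hL
      have hLne : L ≠ [] := pflRunsAux_ne_nil _ _ _
      rw [List.dropLast_cons_of_ne_nil hLne, List.foldl_cons]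
      congr 1
      have hhead : ((fl.drop startI).take (endI + 1 - startI)).headD 0 = fl.getD startI 0 := by
        rw [show endI + 1 - startI = (endI - startI) + 1 by omega]
        exact pfl_slice_headD fl startI (endI - startI) (by omega)
      simp only [pflEmit, hhead, hlast]

-- ===== VERDICT (by name: the statement is the Claim_ definition above) =====
theorem process_frame_list_spec : Claim_equal_process_frame_list := by
  intro fl fr fc fps tp _
  unfold Spec_process_frame_list process_frame_list process_frame_list_alt
  cases fl with
  | nil => rw [pflLoopA]; simp
  | cons x xs =>
    rw [pflLoopA_eq (x :: xs) fr fc (fps * tp) ((x :: xs).length - 1) 0 0 [] (by simp) le_rfl (by simp)]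
    rw [pflB_runs]
    simp
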